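-- pv_equiv track=rewrite | github.com/badasuTCP/i-dash | backend/app/pipelines/google_sheets.py | _detect_date_column
-- ===== SOURCE A (Python) =====
-- from typing import Any, Dict, List, Optional
--
-- def _detect_date_column(column_names: List[str]) -> Optional[str]:
--     """Return the first column whose name contains a common date keyword."""
--     date_patterns = [
--         "date", "created_date", "created at", "timestamp", "day", "month", "time"
--     ]
--     for pattern in date_patterns:
--         for col_name in column_names:
--             if pattern.lower() in col_name.lower():
--                 return col_name
--     return None
-- ===== SOURCE B (Python) =====
-- from typing import List, Optional
--
--
-- def _rank(low: str, patterns: List[str]) -> int: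
--     """Index of the first pattern occurring in low, or len(patterns) if none occurs."""
--     if not patterns:
--         return 0
--     if patterns[0] in low:
--         return 0
--     return 1 + _rank(low, patterns[1:])
--
--
-- def _detect_date_column(column_names: List[str]) -> Optional[str]:
--     """Return the first column whose name contains a common date keyword."""
--     date_patterns = [
--         "date", "created_date", "created at", "timestamp", "day", "month", "time"
--     ]
--     best = None
--     best_rank = len(date_patterns)
--     for col in column_names:
--         rank = _rank(col.lower(), date_patterns)
--         if rank < best_rank:
--             best, best_rank = col, rank
--     return best
-- ===== Notes on version B (the rewrite author's own statement) =====
-- stated objective: alternative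
-- what changed: Replaced the pattern-major nested scan with an early return by a single column-major pass that computes each column's best-pattern rank and keeps the argmin (strict '<' preserves the earliest-column tie-break).
import Mathlib
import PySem

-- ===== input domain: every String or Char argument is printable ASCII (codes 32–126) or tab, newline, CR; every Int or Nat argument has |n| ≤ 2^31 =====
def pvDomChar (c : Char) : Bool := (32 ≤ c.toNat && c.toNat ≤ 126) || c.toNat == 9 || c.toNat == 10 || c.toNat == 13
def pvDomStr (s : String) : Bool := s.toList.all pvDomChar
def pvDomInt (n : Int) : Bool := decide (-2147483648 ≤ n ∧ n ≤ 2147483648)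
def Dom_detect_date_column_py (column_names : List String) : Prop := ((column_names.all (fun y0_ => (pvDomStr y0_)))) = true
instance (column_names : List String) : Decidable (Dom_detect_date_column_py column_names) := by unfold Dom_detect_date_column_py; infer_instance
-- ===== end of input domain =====

-- B re-implements the pattern-major scan-with-early-return as a column-major rank/argmin pass
-- (same cost, different decomposition); return values are proved identical on all inputs.

-- ===== PORT A =====
def pvPatterns : List String :=
  ["date", "created_date", "created at", "timestamp", "day", "month", "time"]

/-- outer loop 'for pattern in date_patterns'; the inner loop with early return is `find?`. -/
def pvGoA : List String → List String → Option String
  | [], _ => none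
  | p :: ps, cols =>
    match cols.find? (fun c => PySem.Str.isIn (PySem.Str.lower p) (PySem.Str.lower c)) with
    | some c => some c
    | none => pvGoA ps cols

def detect_date_column_py (column_names : List String) : Option String :=
  pvGoA pvPatterns column_names

-- ===== PORT B =====
/-- port of Source B's `_rank`: index of first pattern occurring in `low`, or `patterns.length`. -/
def pvRank (low : String) : List String → Nat
  | [] => 0
  | p :: ps => if PySem.Str.isIn p low then 0 else 1 + pvRank low ps

def detect_date_column_py_alt (column_names : List String) : Option String :=
  (column_names.foldl
    (fun st col =>
      if pvRank (PySem.Str.lower col) pvPatterns < st.2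
      then (some col, pvRank (PySem.Str.lower col) pvPatterns) else st)
    ((none : Option String), pvPatterns.length)).1

-- ===== PRECONDITION & SPEC =====
def Spec_detect_date_column_py (column_names : List String) (out : Option String) : Prop := out = detect_date_column_py_alt column_names
instance (column_names : List String) (out : Option String) : Decidable (Spec_detect_date_column_py column_names out) := by unfold Spec_detect_date_column_py; infer_instance

-- ===== CLAIM (what is proved, stated in full; the proofs are below) =====
def Claim_equal_detect_date_column_py : Prop := ∀ (column_names : List String), Dom_detect_date_column_py column_names → Spec_detect_date_column_py column_names (detect_date_column_py column_names)

-- ===== LEMMAS AND PROOFS =====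

theorem pv_find?_congr_mem {α : Type} (l : List α) (p q : α → Bool)
    (h : ∀ x ∈ l, p x = q x) : l.find? p = l.find? q := by
  induction l with
  | nil => rfl
  | cons a l ih =>
    simp only [List.find?_cons]
    rw [h a (by simp)]
    cases q a <;> simp [ih (fun x hx => h x (by simp [hx]))]

theorem pv_foldl_min_le_init (l : List Nat) (a : Nat) : l.foldl min a ≤ a := by
  induction l generalizing a with
  | nil => simp
  | cons x l ih => exact le_trans (ih (min a x)) (by omega)

theorem pv_foldl_min_le_mem (l : List Nat) (a x : Nat) (hx : x ∈ l) : l.foldl min a ≤ x := by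
  induction l generalizing a with
  | nil => simp at hx
  | cons y l ih =>
    rcases List.mem_cons.1 hx with h | h
    · subst h; exact le_trans (pv_foldl_min_le_init l (min a x)) (by omega)
    · exact ih (min a y) h

theorem pv_foldl_min_of_le (l : List Nat) (a : Nat) (h : ∀ x ∈ l, a ≤ x) :
    l.foldl min a = a := by
  induction l with
  | nil => rfl
  | cons x l ih =>
    have hx : a ≤ x := h x (by simp)
    simp only [List.foldl_cons]
    rw [min_eq_left hx]
    exact ih (fun y hy => h y (by simp [hy]))

theorem pv_foldl_min_succ (l : List Nat) (a : Nat) :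
    (l.map (fun x => 1 + x)).foldl min (1 + a) = 1 + l.foldl min a := by
  induction l generalizing a with
  | nil => rfl
  | cons x l ih =>
    simp only [List.map_cons, List.foldl_cons]
    rw [show min (1 + a) (1 + x) = 1 + min a x by omega]
    exact ih (min a x)

/-- characterization of B's fold: first component is the first column attaining the
minimum rank when that minimum improves on the initial one, else the initial best. -/
theorem pv_foldB (f : String → Nat) :
    ∀ (cols : List String) (b : Option String) (r : Nat),
    (cols.foldl (fun st col => if f col < st.2 then (some col, f col) else st) (b, r)).1
      = if (cols.map f).foldl min r < r
        then cols.find? (fun c => f c == (cols.map f).foldl min r) else b := by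
  intro cols
  induction cols with
  | nil => intro b r; simp
  | cons c cs ih =>
    intro b r
    simp only [List.foldl_cons, List.map_cons]
    by_cases hc : f c < r
    · rw [if_pos hc]
      rw [ih (some c) (f c)]
      have hmin : min r (f c) = f c := by omega
      have hM : (cs.map f).foldl min (min r (f c)) = (cs.map f).foldl min (f c) := by rw [hmin]
      have hle : (cs.map f).foldl min (f c) ≤ f c := pv_foldl_min_le_init _ _
      rw [hM]
      by_cases hlt : (cs.map f).foldl min (f c) < f c
      · rw [if_pos hlt, if_pos (by omega)]
        rw [List.find?_cons]
        have : (f c == (cs.map f).foldl min (f c)) = false := by simp; omega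
        rw [this]
      · have heq : (cs.map f).foldl min (f c) = f c := by omega
        rw [if_neg hlt, if_pos (by omega)]
        rw [List.find?_cons]
        have : (f c == (cs.map f).foldl min (f c)) = true := by simp [heq]
        rw [this]
    · rw [if_neg hc]
      rw [ih b r]
      have hmin : min r (f c) = r := by omega
      rw [hmin]
      by_cases hlt : (cs.map f).foldl min r < r
      · rw [if_pos hlt, if_pos hlt]
        rw [List.find?_cons]
        have : (f c == (cs.map f).foldl min r) = false := by simp; omega
        rw [this]
      · rw [if_neg hlt, if_neg hlt]

/-- characterization of A's pattern-major chain in the same rank/argmin terms. -/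
theorem pv_chain (ps : List String) (cols : List String)
    (hps : ∀ p ∈ ps, PySem.Str.lower p = p) :
    pvGoA ps cols
      = if (cols.map (fun c => pvRank (PySem.Str.lower c) ps)).foldl min ps.length < ps.length
        then cols.find? (fun c =>
          pvRank (PySem.Str.lower c) ps == (cols.map (fun c => pvRank (PySem.Str.lower c) ps)).foldl min ps.length)
        else none := by
  induction ps with
  | nil =>
    have h0 : (cols.map (fun c => pvRank (PySem.Str.lower c) [])).foldl min 0 = 0 :=
      pv_foldl_min_of_le _ _ (fun x _ => Nat.zero_le x)
    simp [pvGoA, h0]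
  | cons p ps ih =>
    have hp : PySem.Str.lower p = p := hps p (by simp)
    have hrank : ∀ c : String, pvRank (PySem.Str.lower c) (p :: ps)
        = if PySem.Str.isIn p (PySem.Str.lower c) then 0 else 1 + pvRank (PySem.Str.lower c) ps := by
      intro c; rfl
    simp only [pvGoA, hp]
    cases hfind : cols.find? (fun c => PySem.Str.isIn p (PySem.Str.lower c)) with
    | some c0 =>
      have hc0 := List.find?_some hfind
      have hmem := List.mem_of_find?_eq_some hfind
      have hr0 : pvRank (PySem.Str.lower c0) (p :: ps) = 0 := by rw [hrank, if_pos hc0]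
      have hM : (cols.map (fun c => pvRank (PySem.Str.lower c) (p :: ps))).foldl min (p :: ps).length = 0 := by
        have := pv_foldl_min_le_mem (cols.map (fun c => pvRank (PySem.Str.lower c) (p :: ps)))
          (p :: ps).length 0 (by
            rw [← hr0]; exact List.mem_map_of_mem hmem)
        omega
      rw [hM, if_pos (by simp)]
      have hcong : cols.find? (fun c => pvRank (PySem.Str.lower c) (p :: ps) == 0)
          = cols.find? (fun c => PySem.Str.isIn p (PySem.Str.lower c)) := by
        apply pv_find?_congr_mem
        intro c _
        rw [hrank]
        cases h : PySem.Str.isIn p (PySem.Str.lower c) <;> simp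
      rw [hcong, hfind]
    | none =>
      have hnone : ∀ c ∈ cols, PySem.Str.isIn p (PySem.Str.lower c) = false := by
        intro c hc
        have := List.find?_eq_none.1 hfind c hc
        simpa using this
      have hmapeq : cols.map (fun c => pvRank (PySem.Str.lower c) (p :: ps))
          = (cols.map (fun c => pvRank (PySem.Str.lower c) ps)).map (fun x => 1 + x) := by
        rw [List.map_map]
        apply List.map_congr_left
        intro c hc
        simp only [Function.comp]
        rw [hrank, hnone c hc]
        simp
      have hlen : (p :: ps).length = 1 + ps.length := by simp; omega
      have hM : (cols.map (fun c => pvRank (PySem.Str.lower c) (p :: ps))).foldl min (p :: ps).length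
          = 1 + (cols.map (fun c => pvRank (PySem.Str.lower c) ps)).foldl min ps.length := by
        rw [hmapeq, hlen, pv_foldl_min_succ]
      show pvGoA ps cols = _
      rw [hM]
      rw [ih (fun q hq => hps q (by simp [hq]))]
      by_cases hlt : (cols.map (fun c => pvRank (PySem.Str.lower c) ps)).foldl min ps.length < ps.length
      · rw [if_pos hlt, if_pos (by rw [hlen]; omega)]
        apply pv_find?_congr_mem
        intro c hc
        rw [hrank, hnone c hc]
        simp
      · rw [if_neg hlt, if_neg (by rw [hlen]; omega)]

theorem pv_lower_patterns : ∀ p ∈ pvPatterns, PySem.Str.lower p = p := by decide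

-- ===== VERDICT (by name: the statement is the Claim_ definition above) =====
theorem detect_date_column_py_spec : Claim_equal_detect_date_column_py := by
  intro cols _
  unfold Spec_detect_date_column_py detect_date_column_py detect_date_column_py_alt
  rw [pv_foldB (fun col => pvRank (PySem.Str.lower col) pvPatterns) cols none pvPatterns.length]
  rw [pv_chain pvPatterns cols pv_lower_patterns]
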